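-- pv_equiv track=rewrite | github.com/namboy94/toktokkie | toktokkie/commands/anime_theme_dl.py | segmentize
-- ===== SOURCE A (Python) =====
-- from typing import Dict, List
--
-- def segmentize(titles: List[str]) -> List[List[str]]:
--     """
--     Segments a list of titles into segments (seasons)
--     :param titles: The titles to segmentize
--     :return: The segments
--     """
--
--     segments = []  # type: List[List[str]]
--     current_segment = []  # type: List[str]
--
--     for i, title in enumerate(titles):
--         if i > 0 \
--                 and titles[i - 1].upper() > title.upper() \
--                 and titles[i - 1][0].lower() != title[0].lower():
--             segments.append(current_segment)
--             current_segment = []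
--         current_segment.append(title)
--     segments.append(current_segment)
--
--     return segments
-- ===== SOURCE B (Python) =====
-- from typing import List
--
-- def _first_boundary(titles: List[str]):
--     for i in range(1, len(titles)):
--         if titles[i - 1].upper() > titles[i].upper() \
--                 and titles[i - 1][0].lower() != titles[i][0].lower():
--             return i
--     return None
--
-- def segmentize(titles: List[str]) -> List[List[str]]:
--     i = _first_boundary(titles)
--     if i is None:
--         return [titles]
--     return [titles[:i]] + segmentize(titles[i:])
-- ===== Notes on version B (the rewrite author's own statement) =====
-- stated objective: alternative
-- what changed: B replaces A's single accumulator loop (flush current_segment at each descending boundary) by a recursive decomposition: find the index of the first descending boundary, emit the prefix before it as a segment and recurse on the remaining suffix.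
import Mathlib
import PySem

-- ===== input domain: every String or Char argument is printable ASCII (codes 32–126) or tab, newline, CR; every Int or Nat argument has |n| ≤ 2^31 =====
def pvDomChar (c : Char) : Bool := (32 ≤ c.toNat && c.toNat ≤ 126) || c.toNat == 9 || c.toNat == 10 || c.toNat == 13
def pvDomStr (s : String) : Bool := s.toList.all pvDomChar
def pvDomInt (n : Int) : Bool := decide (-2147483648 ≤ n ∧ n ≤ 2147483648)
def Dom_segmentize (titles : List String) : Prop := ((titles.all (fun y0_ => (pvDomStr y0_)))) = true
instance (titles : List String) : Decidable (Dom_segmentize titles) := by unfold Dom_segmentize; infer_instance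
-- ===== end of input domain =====

-- B re-implements segmentize by recursively splitting the title list at the FIRST descending
-- boundary (head segment + recursion on the rest) instead of A's single accumulator loop;
-- objective: alternative decomposition, same cost.


-- ===== PORT A =====
-- shared predicate: titles[i-1].upper() > title.upper() and titles[i-1][0].lower() != title[0].lower()
-- (the char lookups are Option-matched; inside Pre_ both chars exist whenever the first conjunct holds)
def pvBoundary (prev cur : String) : Bool :=
  PySem.Chars.strLt (PySem.Str.upper cur).toList (PySem.Str.upper prev).toList &&
    (match PySem.Str.pyGet? prev 0, PySem.Str.pyGet? cur 0 with
     | some ca, some cb => PySem.Chars.lowerChar ca != PySem.Chars.lowerChar cb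
     | _, _ => false)

def pvStepA (titles : List String) (st : List (List String) × List String)
    (p : Int × String) : List (List String) × List String :=
  if decide (0 < p.1) && pvBoundary (PySem.List.pyGetD titles (p.1 - 1) "") p.2 then
    (st.1 ++ [st.2], [p.2])
  else
    (st.1, st.2 ++ [p.2])

def segmentize (titles : List String) : List (List String) :=
  let st := (PySem.List.enumerate titles).foldl (pvStepA titles) ([], [])
  st.1 ++ [st.2]

-- ===== PORT B =====
-- index (counted from 1) of the first adjacent pair with pvBoundary, as in Source B's _first_boundary
def pvFirstBoundary : List String → Option Nat
  | a :: b :: rest =>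
    if pvBoundary a b then some 1 else (pvFirstBoundary (b :: rest)).map (· + 1)
  | _ => none

theorem pvFirstBoundary_lt : ∀ (l : List String) (i : Nat),
    pvFirstBoundary l = some i → 0 < i ∧ i < l.length := by
  intro l
  induction l with
  | nil => intro i h; simp [pvFirstBoundary] at h
  | cons a t ih =>
    cases t with
    | nil => intro i h; simp [pvFirstBoundary] at h
    | cons b rest =>
      intro i h
      simp only [pvFirstBoundary] at h
      split at h
      · cases h; simp
      · rcases Option.map_eq_some_iff.mp h with ⟨j, hj, rfl⟩
        have := ih j hj
        simp only [List.length_cons] at *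
        omega

def segmentize_alt (titles : List String) : List (List String) :=
  match h : pvFirstBoundary titles with
  | none => [titles]
  | some i =>
    have := pvFirstBoundary_lt titles i h
    titles.take i :: segmentize_alt (titles.drop i)
termination_by titles.length
decreasing_by
  simp only [List.length_drop]
  omega

-- ===== PRECONDITION & SPEC =====
-- Pre_ excludes exactly the inputs on which A raises IndexError: a nonempty title immediately
-- followed by an empty one (then titles[i-1].upper() > ''.upper() holds and title[0] raises);
-- an empty title never compares greater, so no other input can reach the char lookups unsafely.
def Pre_segmentize (titles : List String) : Prop :=
  ∀ p ∈ titles.zip (titles.drop 1), p.2 = "" → p.1 = ""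
instance (titles : List String) : Decidable (Pre_segmentize titles) := by
  unfold Pre_segmentize; infer_instance

def pvWitness_segmentize : List String := ["B", "a"]

def Spec_segmentize (titles : List String) (out : List (List String)) : Prop :=
  out = segmentize_alt titles
instance (titles : List String) (out : List (List String)) : Decidable (Spec_segmentize titles out) := by
  unfold Spec_segmentize; infer_instance

-- ===== CLAIM (what is proved, stated in full; the proofs are below) =====
def Claim_equal_segmentize : Prop :=
  ∀ (titles : List String), Dom_segmentize titles → Pre_segmentize titles →
    Spec_segmentize titles (segmentize titles)

-- ===== LEMMAS AND PROOFS =====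

-- A's loop, rephrased pairwise: process the remaining titles with the previous title at hand
def pairRun : String → List String → List (List String) × List String →
    List (List String) × List String
  | _, [], st => st
  | prev, t :: rest, st =>
    if pvBoundary prev t then pairRun t rest (st.1 ++ [st.2], [t])
    else pairRun t rest (st.1, st.2 ++ [t])

theorem alt_none {l : List String} (h : pvFirstBoundary l = none) :
    segmentize_alt l = [l] := by
  rw [segmentize_alt]; split <;> simp_all

theorem alt_some {l : List String} {i : Nat} (h : pvFirstBoundary l = some i) :
    segmentize_alt l = l.take i :: segmentize_alt (l.drop i) := by
  rw [segmentize_alt]; split <;> simp_all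

theorem foldA : ∀ (rest titles : List String) (k : Nat) (prev : String)
    (segs : List (List String)) (cur : List String),
    titles.drop k = prev :: rest →
    (PySem.List.enumerate rest (↑k + 1)).foldl (pvStepA titles) (segs, cur)
      = pairRun prev rest (segs, cur) := by
  intro rest
  induction rest with
  | nil => intro titles k prev segs cur _; simp [pairRun]
  | cons t rest' ih =>
    intro titles k prev segs cur h
    have hk : titles[k]? = some prev := by
      rw [← List.head?_drop, h]; rfl
    have hdrop : titles.drop (k + 1) = t :: rest' := by
      rw [← List.drop_drop, h]; rfl
    rw [PySem.List.enumerate_cons, List.foldl_cons]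
    have hcast : (↑k + 1 + 1 : Int) = (↑(k + 1) : Int) + 1 := by push_cast; ring
    rw [hcast]
    cases hb : pvBoundary prev t with
    | true =>
      have hstep : pvStepA titles (segs, cur) (↑k + 1, t) = (segs ++ [cur], [t]) := by
        simp [pvStepA, hk, hb]
      rw [hstep, ih titles (k + 1) t _ _ hdrop]
      simp [pairRun, hb]
    | false =>
      have hstep : pvStepA titles (segs, cur) (↑k + 1, t) = (segs, cur ++ [t]) := by
        simp [pvStepA, hk, hb]
      rw [hstep, ih titles (k + 1) t _ _ hdrop]
      simp [pairRun, hb]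

theorem pairRun_eq_alt : ∀ (rest : List String) (prev : String) (c : List String)
    (segs : List (List String)),
    (pairRun prev rest (segs, c ++ [prev])).1 ++ [(pairRun prev rest (segs, c ++ [prev])).2]
      = segs ++ (segmentize_alt (prev :: rest)).modifyHead (c ++ ·) := by
  intro rest
  induction rest with
  | nil =>
    intro prev c segs
    have hn : pvFirstBoundary [prev] = none := rfl
    rw [alt_none hn]
    simp [pairRun]
  | cons t rest' ih =>
    intro prev c segs
    cases hb : pvBoundary prev t with
    | true =>
      have h1 : pvFirstBoundary (prev :: t :: rest') = some 1 := by
        simp [pvFirstBoundary, hb]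
      rw [alt_some h1]
      have := ih t [] (segs ++ [c ++ [prev]])
      simp only [List.nil_append,
        show List.modifyHead (fun x : List String => x) = id from List.modifyHead_id,
        id_eq] at this
      simp only [pairRun, hb, if_true, this]
      simp
    | false =>
      have hmap : pvFirstBoundary (prev :: t :: rest')
          = (pvFirstBoundary (t :: rest')).map (· + 1) := by
        simp [pvFirstBoundary, hb]
      have := ih t (c ++ [prev]) segs
      simp only [pairRun, hb, Bool.false_eq_true, if_false, this]
      cases hf : pvFirstBoundary (t :: rest') with
      | none =>
        rw [alt_none hf, alt_none (by rw [hmap, hf]; rfl)]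
        simp
      | some j =>
        rw [alt_some hf, alt_some (show pvFirstBoundary (prev :: t :: rest') = some (j + 1) by
          rw [hmap, hf]; rfl)]
        simp [List.take_succ_cons, List.drop_succ_cons, List.append_assoc]

-- ===== VERDICT (by name: the statement is the Claim_ definition above) =====
theorem segmentize_spec : Claim_equal_segmentize := by
  intro titles _ _
  unfold Spec_segmentize
  cases titles with
  | nil =>
    rw [alt_none (show pvFirstBoundary [] = none from rfl)]
    rfl
  | cons t rest =>
    unfold segmentize
    rw [show (PySem.List.enumerate (t :: rest) : List (Int × String))
        = (0, t) :: PySem.List.enumerate rest 1 from PySem.List.enumerate_cons t rest 0]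
    rw [List.foldl_cons]
    have hstep : pvStepA (t :: rest) ([], []) (0, t) = ([], [t]) := by
      simp [pvStepA]
    rw [hstep]
    have hfold := foldA rest (t :: rest) 0 t [] [t] (by simp)
    simp only [Nat.cast_zero, zero_add] at hfold
    have hpr := pairRun_eq_alt rest t [] []
    simp only [List.nil_append] at hpr
    simp only [hfold]
    rw [hpr]
    simp only [
      show List.modifyHead (fun x : List String => x) = id from List.modifyHead_id, id_eq]
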